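-- pv_equiv track=rewrite | github.com/Zephyrion-Yuan/AntibodyPipeline | core/preprocess/test.py | assign_plate_positions
-- ===== SOURCE A (Python) =====
-- def assign_plate_positions(processed_ab):
--     n = len(processed_ab)
--     h_count = 0
--     for v in processed_ab:
--         if v.endswith('H'):
--             h_count += 1
--         else:
--             break
--     l_count = n - h_count
--
--     if h_count % 96 + l_count % 96 > 96:
--         dest_positions = []
--         dest_plate = []
--         for i in range(n):
--             if i < h_count:
--                 h_pos_idx = i % 96 + 1
--                 dest_positions.append(h_pos_idx)
--                 h_plate_idx = i // 96 + 1
--                 dest_plate.append(f'cherry_H_{h_plate_idx}')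
--             else:
--                 cnt = i - h_count
--                 l_pos_idx = cnt % 96 + 1
--                 dest_positions.append(l_pos_idx)
--                 l_plate_idx = cnt // 96 + 1
--                 dest_plate.append(f'cherry_L_{l_plate_idx}')
--         return dest_positions, dest_plate
--     else:
--         dest_positions = []
--         dest_plate = []
--         mix_plate_idx = h_count // 96 + 1
--         mix_plate_l_start = h_count % 96
--         l_mix_start = h_count + (l_count // 96) * 96
--         for i in range(h_count):
--             h_pos_idx = i % 96 + 1
--             dest_positions.append(h_pos_idx)
--             h_plate_idx = i // 96 + 1
--             dest_plate.append(f'cherry_H_{h_plate_idx}')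
--         for i in range(h_count, l_mix_start):
--             cnt = i - h_count
--             l_pos_idx = cnt % 96 + 1
--             dest_positions.append(l_pos_idx)
--             l_plate_idx = cnt // 96 + 1
--             dest_plate.append(f'cherry_L_{l_plate_idx}')
--         for i in range(l_mix_start, n):
--             l_pos_idx = i - l_mix_start + mix_plate_l_start + 1
--             dest_positions.append(l_pos_idx)
--             dest_plate.append(f'cherry_H_{mix_plate_idx}')
--         return dest_positions, dest_plate
-- ===== SOURCE B (Python) =====
-- def assign_plate_positions(processed_ab):
--     n = len(processed_ab)
--     h_count = next((i for i, v in enumerate(processed_ab) if not v.endswith('H')), n)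
--     l_count = n - h_count
--
--     def chunk_blocks(count, prefix):
--         pos, plate = [], []
--         block_no = 1
--         remaining = count
--         while remaining > 0:
--             size = min(96, remaining)
--             pos.extend(range(1, size + 1))
--             plate.extend([f'{prefix}{block_no}'] * size)
--             remaining -= size
--             block_no += 1
--         return pos, plate
--
--     h_pos, h_plate = chunk_blocks(h_count, 'cherry_H_')
--     if h_count % 96 + l_count % 96 > 96:
--         l_pos, l_plate = chunk_blocks(l_count, 'cherry_L_')
--         return h_pos + l_pos, h_plate + l_plate
--     else:
--         full_l = (l_count // 96) * 96
--         l_pos, l_plate = chunk_blocks(full_l, 'cherry_L_')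
--         rem = l_count - full_l
--         start = h_count % 96
--         tail_pos = list(range(start + 1, start + rem + 1))
--         tail_plate = [f'cherry_H_{h_count // 96 + 1}'] * rem
--         return h_pos + l_pos + tail_pos, h_plate + l_plate + tail_plate
-- ===== Notes on version B (the rewrite author's own statement) =====
-- stated objective: alternative
-- what changed: Replaces A's per-index modular arithmetic over range(n) with a group-then-emit traversal: a chunking helper splits each count into consecutive 96-blocks emitting a run of positions 1..size and a replicated plate name, plus an explicit leftover-L tail on the mixed plate.
import Mathlib
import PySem

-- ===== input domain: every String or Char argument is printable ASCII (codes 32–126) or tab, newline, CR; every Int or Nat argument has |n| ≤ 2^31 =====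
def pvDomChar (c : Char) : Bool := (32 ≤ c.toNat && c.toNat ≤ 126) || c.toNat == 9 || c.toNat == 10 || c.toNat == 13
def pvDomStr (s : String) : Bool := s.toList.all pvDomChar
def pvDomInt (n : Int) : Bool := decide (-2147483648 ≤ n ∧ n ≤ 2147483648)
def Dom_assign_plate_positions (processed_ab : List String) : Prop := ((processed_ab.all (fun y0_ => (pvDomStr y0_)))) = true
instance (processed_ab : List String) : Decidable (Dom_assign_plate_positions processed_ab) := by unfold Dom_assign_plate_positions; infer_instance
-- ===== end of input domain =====

-- B replaces A's per-index modular arithmetic with a group-then-emit chunking traversal; objective: alternative (same O(n) cost).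

-- ===== PORT A =====
-- A's prefix scan: "for v in …: if v.endswith('H'): h_count += 1 else: break"
def pvHCountA : List String → Nat
  | [] => 0
  | v :: rest => if PySem.Str.endswith v "H" then pvHCountA rest + 1 else 0

def assign_plate_positions (processed_ab : List String) : List Int × List String :=
  let n := processed_ab.length
  let h_count := pvHCountA processed_ab
  let l_count := n - h_count
  if h_count % 96 + l_count % 96 > 96 then
    -- for i in range(n): branch on i < h_count (indices are nonnegative, so Nat iteration is exact)
    (List.range n).foldl (fun s i =>
      if i < h_count then
        (s.1 ++ [((i % 96 + 1 : Nat) : Int)], s.2 ++ ["cherry_H_" ++ PySem.Int.toStr ((i / 96 + 1 : Nat) : Int)])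
      else
        let cnt := i - h_count
        (s.1 ++ [((cnt % 96 + 1 : Nat) : Int)], s.2 ++ ["cherry_L_" ++ PySem.Int.toStr ((cnt / 96 + 1 : Nat) : Int)]))
      ([], [])
  else
    let mix_plate_idx := h_count / 96 + 1
    let mix_plate_l_start := h_count % 96
    let l_mix_start := h_count + (l_count / 96) * 96
    let s1 := (List.range h_count).foldl (fun s i =>
      (s.1 ++ [((i % 96 + 1 : Nat) : Int)], s.2 ++ ["cherry_H_" ++ PySem.Int.toStr ((i / 96 + 1 : Nat) : Int)])) ([], [])
    -- for i in range(h_count, l_mix_start)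
    let s2 := (List.range' h_count (l_mix_start - h_count)).foldl (fun s i =>
      let cnt := i - h_count
      (s.1 ++ [((cnt % 96 + 1 : Nat) : Int)], s.2 ++ ["cherry_L_" ++ PySem.Int.toStr ((cnt / 96 + 1 : Nat) : Int)])) s1
    -- for i in range(l_mix_start, n)
    (List.range' l_mix_start (n - l_mix_start)).foldl (fun s i =>
      (s.1 ++ [((i - l_mix_start + mix_plate_l_start + 1 : Nat) : Int)],
       s.2 ++ ["cherry_H_" ++ PySem.Int.toStr ((mix_plate_idx : Nat) : Int)])) s2

-- ===== PORT B =====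
-- B's chunking helper: while remaining > 0: emit one block of min(96, remaining)
def pvChunkBlocks (pre : String) (block_no : Nat) (remaining : Nat) : List Int × List String :=
  if _h : remaining = 0 then ([], [])
  else
    let size := min 96 remaining
    let rest := pvChunkBlocks pre (block_no + 1) (remaining - size)
    ((List.range size).map (fun j => ((j + 1 : Nat) : Int)) ++ rest.1,
     List.replicate size (pre ++ PySem.Int.toStr ((block_no : Nat) : Int)) ++ rest.2)
  termination_by remaining
  decreasing_by omega

def assign_plate_positions_alt (processed_ab : List String) : List Int × List String :=
  let n := processed_ab.length
  -- h_count = next((i for i, v in enumerate(processed_ab) if not v.endswith('H')), n)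
  let h_count := match processed_ab.findIdx? (fun v => !PySem.Str.endswith v "H") with
    | some i => i
    | none => n
  let l_count := n - h_count
  let h := pvChunkBlocks "cherry_H_" 1 h_count
  if h_count % 96 + l_count % 96 > 96 then
    let l := pvChunkBlocks "cherry_L_" 1 l_count
    (h.1 ++ l.1, h.2 ++ l.2)
  else
    let full_l := (l_count / 96) * 96
    let l := pvChunkBlocks "cherry_L_" 1 full_l
    let rem := l_count - full_l
    let start := h_count % 96
    let tail_pos := (List.range rem).map (fun j => ((start + j + 1 : Nat) : Int))
    let tail_plate := List.replicate rem ("cherry_H_" ++ PySem.Int.toStr ((h_count / 96 + 1 : Nat) : Int))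
    (h.1 ++ l.1 ++ tail_pos, h.2 ++ l.2 ++ tail_plate)

-- ===== PRECONDITION & SPEC =====
def Spec_assign_plate_positions (processed_ab : List String) (out : List Int × List String) : Prop := out = assign_plate_positions_alt processed_ab
instance (processed_ab : List String) (out : List Int × List String) : Decidable (Spec_assign_plate_positions processed_ab out) := by unfold Spec_assign_plate_positions; infer_instance

-- ===== CLAIM (what is proved, stated in full; the proofs are below) =====
def Claim_equal_assign_plate_positions : Prop := ∀ (processed_ab : List String), Dom_assign_plate_positions processed_ab → Spec_assign_plate_positions processed_ab (assign_plate_positions processed_ab)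

-- ===== LEMMAS AND PROOFS =====

theorem hcount_eq (l : List String) :
    (match l.findIdx? (fun v => !PySem.Str.endswith v "H") with
      | some i => i | none => l.length) = pvHCountA l := by
  induction l with
  | nil => simp [pvHCountA]
  | cons v rest ih =>
    simp only [List.findIdx?_cons, pvHCountA, List.length_cons]
    by_cases h : PySem.Str.endswith v "H" = true
    · simp only [h, Bool.not_true, Bool.false_eq_true, if_false, if_true]
      cases hf : rest.findIdx? (fun v => !PySem.Str.endswith v "H") with
      | none => rw [hf] at ih; simpa using ih
      | some i => rw [hf] at ih; simpa using ih
    · rw [eq_false_of_ne_true h]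
      simp

theorem hcount_le (l : List String) : pvHCountA l ≤ l.length := by
  induction l with
  | nil => simp [pvHCountA]
  | cons v rest ih => simp only [pvHCountA]; split <;> simp; omega

theorem foldl_pair_append {α : Type} (f : α → Int) (g : α → String) (l : List α) (p : List Int) (q : List String) :
    l.foldl (fun s i => (s.1 ++ [f i], s.2 ++ [g i])) (p, q) = (p ++ l.map f, q ++ l.map g) := by
  induction l generalizing p q with
  | nil => simp
  | cons a l ih => simp [List.foldl_cons, ih]

theorem range_split (a m : Nat) (h : a ≤ m) :
    List.range m = List.range a ++ (List.range (m - a)).map (fun x => a + x) := by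
  rw [← List.range_add]; congr 1; omega

theorem chunk_fst (p : String) : ∀ m b, (pvChunkBlocks p b m).1 = (List.range m).map (fun i => ((i % 96 + 1 : Nat) : Int)) := by
  intro m
  induction m using Nat.strong_induction_on with
  | _ m ih =>
    intro b
    rw [pvChunkBlocks]
    by_cases h : m = 0
    · simp [h]
    · rw [dif_neg h]
      by_cases h96 : m ≤ 96
      · have hmin : min 96 m = m := by omega
        simp only [hmin, Nat.sub_self]
        rw [pvChunkBlocks, dif_pos rfl]
        simp only [List.append_nil]
        refine List.map_congr_left (fun i hi => ?_)
        have hi' := List.mem_range.mp hi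
        have he : i % 96 + 1 = i + 1 := by omega
        simp only [he]
      · have hmin : min 96 m = 96 := by omega
        simp only [hmin]
        rw [ih (m - 96) (by omega) (b + 1), range_split 96 m (by omega), List.map_append, List.map_map]
        have e1 : (List.range 96).map (fun i => ((i % 96 + 1 : Nat) : Int)) = (List.range 96).map (fun j => ((j + 1 : Nat) : Int)) := by
          refine List.map_congr_left (fun i hi => ?_)
          have hi' := List.mem_range.mp hi
          have he : i % 96 + 1 = i + 1 := by omega
          simp only [he]
        have e2 : (List.range (m - 96)).map ((fun i => ((i % 96 + 1 : Nat) : Int)) ∘ (fun x => 96 + x)) = (List.range (m - 96)).map (fun i => ((i % 96 + 1 : Nat) : Int)) := by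
          refine List.map_congr_left (fun i hi => ?_)
          have he : (96 + i) % 96 = i % 96 := by omega
          simp only [Function.comp_apply, he]
        rw [e1, e2]

theorem chunk_snd (p : String) : ∀ m b, (pvChunkBlocks p b m).2 = (List.range m).map (fun i => p ++ PySem.Int.toStr ((i / 96 + b : Nat) : Int)) := by
  intro m
  induction m using Nat.strong_induction_on with
  | _ m ih =>
    intro b
    rw [pvChunkBlocks]
    by_cases h : m = 0
    · simp [h]
    · rw [dif_neg h]
      by_cases h96 : m ≤ 96
      · have hmin : min 96 m = m := by omega
        simp only [hmin, Nat.sub_self]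
        rw [pvChunkBlocks, dif_pos rfl]
        simp only [List.append_nil]
        symm
        rw [List.eq_replicate_iff]
        refine ⟨by simp, ?_⟩
        intro x hx
        simp only [List.mem_map, List.mem_range] at hx
        obtain ⟨i, hi, rfl⟩ := hx
        have h0 : i / 96 + b = b := by omega
        rw [h0]
      · have hmin : min 96 m = 96 := by omega
        simp only [hmin]
        rw [ih (m - 96) (by omega) (b + 1), range_split 96 m (by omega), List.map_append, List.map_map]
        have e1 : (List.range 96).map (fun i => p ++ PySem.Int.toStr ((i / 96 + b : Nat) : Int)) = List.replicate 96 (p ++ PySem.Int.toStr ((b : Nat) : Int)) := by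
          rw [List.eq_replicate_iff]
          refine ⟨by simp, ?_⟩
          intro x hx
          simp only [List.mem_map, List.mem_range] at hx
          obtain ⟨i, hi, rfl⟩ := hx
          have h0 : i / 96 + b = b := by omega
          rw [h0]
        have e2 : (List.range (m - 96)).map ((fun i => p ++ PySem.Int.toStr ((i / 96 + b : Nat) : Int)) ∘ (fun x => 96 + x)) = (List.range (m - 96)).map (fun i => p ++ PySem.Int.toStr ((i / 96 + (b + 1) : Nat) : Int)) := by
          refine List.map_congr_left (fun i hi => ?_)
          have he : (96 + i) / 96 + b = i / 96 + (b + 1) := by omega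
          simp only [Function.comp_apply, he]
        rw [e1, e2]


theorem branch1 (n h : Nat) (hle : h ≤ n) :
    List.foldl
      (fun (s : List Int × List String) (i : Nat) =>
        if i < h then (s.1 ++ [((i % 96 + 1 : Nat) : Int)], s.2 ++ ["cherry_H_" ++ PySem.Int.toStr ((i / 96 + 1 : Nat) : Int)])
        else
          (s.1 ++ [(((i - h) % 96 + 1 : Nat) : Int)],
            s.2 ++ ["cherry_L_" ++ PySem.Int.toStr (((i - h) / 96 + 1 : Nat) : Int)]))
      ([], []) (List.range n) =
    ((pvChunkBlocks "cherry_H_" 1 h).1 ++ (pvChunkBlocks "cherry_L_" 1 (n - h)).1,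
      (pvChunkBlocks "cherry_H_" 1 h).2 ++ (pvChunkBlocks "cherry_L_" 1 (n - h)).2) := by
  have hfun : (fun (s : List Int × List String) (i : Nat) =>
        if i < h then (s.1 ++ [((i % 96 + 1 : Nat) : Int)], s.2 ++ ["cherry_H_" ++ PySem.Int.toStr ((i / 96 + 1 : Nat) : Int)])
        else
          (s.1 ++ [(((i - h) % 96 + 1 : Nat) : Int)],
            s.2 ++ ["cherry_L_" ++ PySem.Int.toStr (((i - h) / 96 + 1 : Nat) : Int)])) =
      (fun (s : List Int × List String) (i : Nat) =>
        (s.1 ++ [if i < h then ((i % 96 + 1 : Nat) : Int) else (((i - h) % 96 + 1 : Nat) : Int)],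
         s.2 ++ [if i < h then "cherry_H_" ++ PySem.Int.toStr ((i / 96 + 1 : Nat) : Int)
                 else "cherry_L_" ++ PySem.Int.toStr (((i - h) / 96 + 1 : Nat) : Int)])) := by
    funext s i
    by_cases hi : i < h <;> simp [hi]
  rw [hfun, foldl_pair_append, chunk_fst, chunk_fst, chunk_snd, chunk_snd,
      range_split h n hle, List.map_append, List.map_append, List.map_map, List.map_map]
  refine Prod.ext ?_ ?_
  · simp only [List.nil_append]
    congr 1
    · refine List.map_congr_left (fun i hi => ?_)
      have hi' := List.mem_range.mp hi
      simp [hi']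
    · refine List.map_congr_left (fun i hi => ?_)
      have hfalse : ¬ (h + i < h) := by omega
      have he : h + i - h = i := by omega
      simp [Function.comp_apply, hfalse, he]
  · simp only [List.nil_append]
    congr 1
    · refine List.map_congr_left (fun i hi => ?_)
      have hi' := List.mem_range.mp hi
      simp [hi']
    · refine List.map_congr_left (fun i hi => ?_)
      have hfalse : ¬ (h + i < h) := by omega
      have he : h + i - h = i := by omega
      simp [Function.comp_apply, hfalse, he]

theorem branch2 (n h : Nat) (hle : h ≤ n) :
    List.foldl
      (fun (s : List Int × List String) (i : Nat) =>
        (s.1 ++ [((i - (h + (n - h) / 96 * 96) + h % 96 + 1 : Nat) : Int)],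
          s.2 ++ ["cherry_H_" ++ PySem.Int.toStr ((h / 96 + 1 : Nat) : Int)]))
      (List.foldl
        (fun (s : List Int × List String) (i : Nat) =>
          (s.1 ++ [(((i - h) % 96 + 1 : Nat) : Int)],
            s.2 ++ ["cherry_L_" ++ PySem.Int.toStr (((i - h) / 96 + 1 : Nat) : Int)]))
        (List.foldl (fun (s : List Int × List String) (i : Nat) =>
            (s.1 ++ [((i % 96 + 1 : Nat) : Int)], s.2 ++ ["cherry_H_" ++ PySem.Int.toStr ((i / 96 + 1 : Nat) : Int)]))
          ([], []) (List.range h))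
        (List.range' h (h + (n - h) / 96 * 96 - h)))
      (List.range' (h + (n - h) / 96 * 96) (n - (h + (n - h) / 96 * 96))) =
    ((pvChunkBlocks "cherry_H_" 1 h).1 ++ (pvChunkBlocks "cherry_L_" 1 ((n - h) / 96 * 96)).1 ++
        List.map (fun j => ((h % 96 + j + 1 : Nat) : Int)) (List.range (n - h - (n - h) / 96 * 96)),
      (pvChunkBlocks "cherry_H_" 1 h).2 ++ (pvChunkBlocks "cherry_L_" 1 ((n - h) / 96 * 96)).2 ++
        List.replicate (n - h - (n - h) / 96 * 96) ("cherry_H_" ++ PySem.Int.toStr ((h / 96 + 1 : Nat) : Int))) := by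
  rw [foldl_pair_append, foldl_pair_append, foldl_pair_append]
  rw [chunk_fst, chunk_fst, chunk_snd, chunk_snd]
  have hmid : h + (n - h) / 96 * 96 - h = (n - h) / 96 * 96 := by omega
  have htail : n - (h + (n - h) / 96 * 96) = n - h - (n - h) / 96 * 96 := by
    have := Nat.div_mul_le_self (n - h) 96
    omega
  rw [hmid, htail, List.range'_eq_map_range, List.range'_eq_map_range]
  simp only [List.map_map]
  refine Prod.ext ?_ ?_ <;> simp only [List.nil_append, List.append_assoc]
  · refine congrArg₂ (· ++ ·) ?_ (congrArg₂ (· ++ ·) ?_ ?_)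
    · rfl
    · refine List.map_congr_left (fun i hi => ?_)
      have he : h + i - h = i := by omega
      simp [Function.comp_apply, he]
    · refine List.map_congr_left (fun i hi => ?_)
      have he : h + (n - h) / 96 * 96 + i - (h + (n - h) / 96 * 96) + h % 96 + 1 = h % 96 + i + 1 := by omega
      simp only [Function.comp_apply, he]
  · refine congrArg₂ (· ++ ·) ?_ (congrArg₂ (· ++ ·) ?_ ?_)
    · rfl
    · refine List.map_congr_left (fun i hi => ?_)
      have he : h + i - h = i := by omega
      simp [Function.comp_apply, he]
    · rw [List.eq_replicate_iff]
      refine ⟨by simp, ?_⟩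
      intro x hx
      simp only [List.mem_map] at hx
      obtain ⟨i, _, rfl⟩ := hx
      rfl

theorem assign_plate_positions_spec : Claim_equal_assign_plate_positions := by
  intro l _
  unfold Spec_assign_plate_positions
  simp only [assign_plate_positions, assign_plate_positions_alt, hcount_eq]
  have hle := hcount_le l
  by_cases hc : pvHCountA l % 96 + (l.length - pvHCountA l) % 96 > 96
  · simp only [if_pos hc]
    exact branch1 l.length (pvHCountA l) hle
  · simp only [if_neg hc]
    exact branch2 l.length (pvHCountA l) hle
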